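-- pv_equiv track=rewrite | github.com/C-Kernel-Engine/C-Kernel-Engine | version/v7/scripts/dataset/materialize_spec04_structured_atoms_v7.py | _split_even
-- ===== SOURCE A (Python) =====
-- def _split_even(rows: list[str]) -> tuple[list[str], list[str]]:
--     dev: list[str] = []
--     test: list[str] = []
--     for idx, row in enumerate(rows):
--         (dev if idx % 2 == 0 else test).append(row)
--     if rows and not test:
--         test.append(dev.pop())
--     return dev, test
-- ===== SOURCE B (Python) =====
-- def _split_even(rows: list[str]) -> tuple[list[str], list[str]]:
--     dev = rows[::2]
--     test = rows[1::2]
--     if rows and not test: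
--         test.append(dev.pop())
--     return dev, test
-- ===== Notes on version B (the rewrite author's own statement) =====
-- stated objective: simpler
-- what changed: Replaces the enumerate loop with a per-element parity branch by two strided slices rows[::2] and rows[1::2] that partition by index parity in closed form; the single-element fixup is kept verbatim.
import Mathlib
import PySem

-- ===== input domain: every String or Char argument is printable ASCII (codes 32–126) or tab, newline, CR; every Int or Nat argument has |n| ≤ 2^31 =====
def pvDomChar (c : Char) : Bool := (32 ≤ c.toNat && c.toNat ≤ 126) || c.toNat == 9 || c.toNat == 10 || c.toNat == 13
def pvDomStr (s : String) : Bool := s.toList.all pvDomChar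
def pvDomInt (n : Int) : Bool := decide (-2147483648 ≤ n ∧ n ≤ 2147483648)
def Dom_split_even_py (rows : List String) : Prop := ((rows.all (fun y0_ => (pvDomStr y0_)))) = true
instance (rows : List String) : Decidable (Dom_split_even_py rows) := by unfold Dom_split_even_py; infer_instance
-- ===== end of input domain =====

-- B replaces A's enumerate loop with a per-element parity branch by two strided slices
-- (rows[::2], rows[1::2]) computed in closed form; same values, same cost. (objective: simpler)

-- ===== PORT A =====
-- the loop body: append row to dev if idx % 2 == 0 else to test
def splitEvenStep (acc : List String × List String) (p : Int × String) : List String × List String :=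
  if p.1 % 2 == 0 then (acc.1 ++ [p.2], acc.2) else (acc.1, acc.2 ++ [p.2])

def split_even_py (rows : List String) : List String × List String :=
  let s := (PySem.List.enumerate rows 0).foldl splitEvenStep ([], [])
  if rows ≠ [] ∧ s.2 = [] then
    match PySem.List.pop? s.1 with          -- dev.pop()  (default index -1)
    | some (v, dev') => (dev', s.2 ++ [v])
    | none => (s.1, s.2)                    -- unreachable: dev nonempty under the guard
  else (s.1, s.2)

-- ===== PORT B =====
-- rows[::2] / rows[1::2]: step-2 slicing, ported by hand (PySem has no step slices);
-- exact: takes every other element starting at index 0.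
def pvStride2 (xs : List String) : List String :=
  match xs with
  | [] => []
  | [x] => [x]
  | x :: _ :: rest => x :: pvStride2 rest

def split_even_py_alt (rows : List String) : List String × List String :=
  let dev := pvStride2 rows                 -- rows[::2]
  let test := pvStride2 rows.tail           -- rows[1::2]
  if rows ≠ [] ∧ test = [] then
    (dev.dropLast, test ++ [dev.getLastD ""])   -- test.append(dev.pop()); dev nonempty under the guard
  else (dev, test)

-- ===== PRECONDITION & SPEC =====
def Spec_split_even_py (rows : List String) (out : List String × List String) : Prop := out = split_even_py_alt rows
instance (rows : List String) (out : List String × List String) : Decidable (Spec_split_even_py rows out) := by unfold Spec_split_even_py; infer_instance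

-- ===== CLAIM (what is proved, stated in full; the proofs are below) =====
def Claim_equal_split_even_py : Prop := ∀ (rows : List String), Dom_split_even_py rows → Spec_split_even_py rows (split_even_py rows)

-- ===== LEMMAS AND PROOFS =====

theorem pvStride2_cons (y : String) (rest : List String) :
    pvStride2 (y :: rest) = y :: pvStride2 rest.tail := by
  cases rest <;> simp [pvStride2]

theorem pvStride2_eq_nil_iff (xs : List String) : pvStride2 xs = [] ↔ xs = [] := by
  cases xs <;> simp [pvStride2, pvStride2_cons]

theorem splitEven_loop (rows : List String) (n : Int) (hn : n % 2 = 0) (d t : List String) :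
    (PySem.List.enumerate rows n).foldl splitEvenStep (d, t)
      = (d ++ pvStride2 rows, t ++ pvStride2 rows.tail) := by
  induction rows using pvStride2.induct generalizing n d t with
  | case1 => simp [PySem.List.enumerate, pvStride2]
  | case2 x =>
      simp [PySem.List.enumerate, splitEvenStep, hn, pvStride2]
  | case3 x y rest ih =>
      have h1 : (n + 1) % 2 = 1 := by omega
      have h2 : (n + 1 + 1) % 2 = 0 := by omega
      rw [PySem.List.enumerate_cons, PySem.List.enumerate_cons]
      simp only [List.foldl_cons, splitEvenStep, hn, h1]
      norm_num
      rw [ih (n + 1 + 1) h2]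
      simp [pvStride2, pvStride2_cons y rest]

-- ===== VERDICT (by name: the statement is the Claim_ definition above) =====
theorem split_even_py_spec : Claim_equal_split_even_py := by
  intro rows _
  unfold Spec_split_even_py split_even_py split_even_py_alt
  have hloop := splitEven_loop rows 0 (by decide) [] []
  norm_num at hloop
  rw [hloop]
  by_cases hg : rows ≠ [] ∧ pvStride2 rows.tail = []
  · obtain ⟨hne, ht⟩ := hg
    have htail : rows.tail = [] := (pvStride2_eq_nil_iff _).mp ht
    obtain ⟨x, rest, rfl⟩ : ∃ x rest, rows = x :: rest := by
      cases rows with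
      | nil => exact absurd rfl hne
      | cons a b => exact ⟨a, b, rfl⟩
    have : rest = [] := by simpa using htail
    subst this
    simp [pvStride2, PySem.List.pop?, PySem.List.pyIdx?]
  · simp [hg]
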